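-- pv_equiv track=rewrite | github.com/alrog0/brain-vt-ocr-chunking | ocr_chunking.py | rebalance_chunks
-- ===== SOURCE A (Python) =====
-- from typing import Any, Dict, List, Optional, Tuple
--
-- def safe_str(value: Any, default: str = "") -> str:
--     """Safe str conversion."""
--     if value is None:
--         return default
--     try:
--         return str(value)
--     except Exception:
--         return default
--
-- def rebalance_chunks(chunks: List[str], target: Optional[int]) -> List[str]:
--     """Rebalances chunk list to target count if needed."""
--     if target is None:
--         return chunks
--     wanted = max(1, int(target))
--     clean = [safe_str(x, "").strip() for x in chunks if safe_str(x, "").strip()]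
--     if len(clean) == wanted:
--         return clean
--     if len(clean) > wanted:
--         return clean[:wanted]
--     while len(clean) < wanted:
--         longest_idx = max(range(len(clean)), key=lambda idx: len(clean[idx]))
--         source = clean[longest_idx]
--         if len(source) < 2:
--             break
--         split_at = max(1, len(source) // 2)
--         left = source[:split_at].strip()
--         right = source[split_at:].strip()
--         if not left or not right:
--             break
--         clean = clean[:longest_idx] + [left, right] + clean[longest_idx + 1 :]
--     return clean[:wanted]
-- ===== SOURCE B (Python) =====
-- from bisect import insort
-- from typing import Any, List, Optional
--
--
-- def safe_str(value: Any, default: str = "") -> str: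
--     if value is None:
--         return default
--     try:
--         return str(value)
--     except Exception:
--         return default
--
--
-- def rebalance_chunks(chunks: List[str], target: Optional[int]) -> List[str]:
--     """Rebalance via a priority queue kept sorted by (-len, split-tree path):
--     popping the front is the longest chunk (earliest position on ties), and the
--     paths, compared lexicographically, give the final output order."""
--     if target is None:
--         return chunks
--     wanted = max(1, int(target))
--     clean = [s for s in (safe_str(x, "").strip() for x in chunks) if s]
--     if wanted <= len(clean):
--         return clean[:wanted]
--     q = []
--     for i, s in enumerate(clean):
--         insort(q, ((-len(s), (i,)), s), key=lambda kv: kv[0])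
--     while q and len(q) < wanted:
--         (_, path), source = q[0]
--         if len(source) < 2:
--             break
--         left = source[: len(source) // 2].strip()
--         right = source[len(source) // 2 :].strip()
--         if not left or not right:
--             break
--         q.pop(0)
--         insort(q, ((-len(left), path + (0,)), left), key=lambda kv: kv[0])
--         insort(q, ((-len(right), path + (1,)), right), key=lambda kv: kv[0])
--     q.sort(key=lambda kv: kv[0][1])
--     return [s for _, s in q]
-- ===== Notes on version B (the rewrite author's own statement) =====
-- stated objective: alternative
-- what changed: Instead of rescanning the whole list for the longest chunk and rebuilding the list on every split, B keeps a priority queue ordered by (-length, split-tree path) via bisect.insort, pops the front chunk each round, and finally sorts once by path (lexicographic path order = list position) to restore the output order.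
import Mathlib
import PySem

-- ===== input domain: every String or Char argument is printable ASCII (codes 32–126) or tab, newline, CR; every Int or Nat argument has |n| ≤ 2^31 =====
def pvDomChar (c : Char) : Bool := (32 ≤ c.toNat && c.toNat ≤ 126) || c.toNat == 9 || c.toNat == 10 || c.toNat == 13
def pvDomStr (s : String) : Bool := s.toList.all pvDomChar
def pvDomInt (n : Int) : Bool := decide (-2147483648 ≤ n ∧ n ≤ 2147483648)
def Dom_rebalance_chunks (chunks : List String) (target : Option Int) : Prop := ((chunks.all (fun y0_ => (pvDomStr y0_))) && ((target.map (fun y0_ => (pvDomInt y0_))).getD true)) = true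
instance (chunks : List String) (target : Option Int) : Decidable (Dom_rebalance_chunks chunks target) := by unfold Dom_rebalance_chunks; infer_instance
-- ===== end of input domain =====

-- B replaces A's per-split rescan of the whole list (argmax + full-list rebuild) by a
-- priority queue kept sorted by (-length, split-tree path): a different algorithm, same values.

-- ===== PORT A =====
-- shared helper: the 'clean' comprehension [safe_str(x,"").strip() for x in chunks if safe_str(x,"").strip()]
-- (safe_str is the identity on str inputs)
def pvClean (chunks : List String) : List String :=
  chunks.filterMap (fun x =>
    let s := PySem.Str.strip x
    if s = "" then none else some s)

-- the while-loop of A; fuel = wanted - len(clean) iterations suffice (each pass grows the list by 1)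
def rebalance_chunks_loopA (wanted : Int) : Nat → List String → List String
  | 0, clean => clean
  | fuel+1, clean =>
    if PySem.List.len clean < wanted then
      match PySem.List.max? (PySem.List.pyRange 0 (PySem.List.len clean))
          (fun idx => PySem.Str.len (PySem.List.pyGetD clean idx "")) with
      | none => clean  -- Python raises ValueError here (empty range); excluded by Pre_
      | some longest_idx =>
        let source := PySem.List.pyGetD clean longest_idx ""  -- in range: longest_idx ∈ range(len(clean))
        if PySem.Str.len source < 2 then clean
        else
          let split_at := max 1 (PySem.Int.floordiv (PySem.Str.len source) 2)
          let left := PySem.Str.strip (PySem.Str.slice source none (some split_at))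
          let right := PySem.Str.strip (PySem.Str.slice source (some split_at) none)
          if left = "" ∨ right = "" then clean
          else rebalance_chunks_loopA wanted fuel
            (PySem.List.slice clean none (some longest_idx) ++ [left, right] ++
             PySem.List.slice clean (some (longest_idx + 1)) none)
    else clean

def rebalance_chunks (chunks : List String) (target : Option Int) : List String :=
  match target with
  | none => chunks
  | some t =>
    let wanted : Int := max 1 t
    let clean := pvClean chunks
    if PySem.List.len clean = wanted then clean
    else if PySem.List.len clean > wanted then PySem.List.slice clean none (some wanted)
    else PySem.List.slice
      (rebalance_chunks_loopA wanted (wanted - PySem.List.len clean).toNat clean)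
      none (some wanted)

-- ===== PORT B =====
-- lexicographic strict 'less-than' on split-tree paths (Python tuple comparison)
def pvLexLt : List Int → List Int → Bool
  | [], [] => false
  | [], _ :: _ => true
  | _ :: _, [] => false
  | a :: as, b :: bs => if a < b then true else if b < a then false else pvLexLt as bs

-- Python '<' on the queue keys (-len, path)
def pvKeyLt (a b : Int × List Int) : Bool :=
  if a.1 < b.1 then true else if b.1 < a.1 then false else pvLexLt a.2 b.2

-- bisect.insort with key kv[0]: insert before the first strictly greater key
def pvQInsert (x : (Int × List Int) × String) :
    List ((Int × List Int) × String) → List ((Int × List Int) × String)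
  | [] => [x]
  | y :: ys => if pvKeyLt x.1 y.1 then x :: y :: ys else y :: pvQInsert x ys

-- the while-loop of B over the sorted queue
def rebalance_chunks_loopB (wanted : Int) :
    Nat → List ((Int × List Int) × String) → List ((Int × List Int) × String)
  | 0, q => q
  | fuel+1, q =>
    match q with
    | [] => []
    | ((k, path), source) :: rest =>
      if PySem.List.len (((k, path), source) :: rest) < wanted then
        if PySem.Str.len source < 2 then ((k, path), source) :: rest
        else
          let left := PySem.Str.strip (PySem.Str.slice source none
            (some (PySem.Int.floordiv (PySem.Str.len source) 2)))
          let right := PySem.Str.strip (PySem.Str.slice source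
            (some (PySem.Int.floordiv (PySem.Str.len source) 2)) none)
          if left = "" ∨ right = "" then ((k, path), source) :: rest
          else rebalance_chunks_loopB wanted fuel
            (pvQInsert ((-(PySem.Str.len right), path ++ [1]), right)
              (pvQInsert ((-(PySem.Str.len left), path ++ [0]), left) rest))
      else ((k, path), source) :: rest

def rebalance_chunks_alt (chunks : List String) (target : Option Int) : List String :=
  match target with
  | none => chunks
  | some t =>
    let wanted : Int := max 1 t
    let clean := pvClean chunks
    if wanted ≤ PySem.List.len clean then PySem.List.slice clean none (some wanted)
    else
      let q0 := (PySem.List.enumerate clean 0).foldl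
        (fun q is => pvQInsert ((-(PySem.Str.len is.2), [is.1]), is.2) q) []
      let qf := rebalance_chunks_loopB wanted (wanted - PySem.List.len clean).toNat q0
      (PySem.List.sorted qf (fun kv => kv.1.2)).map Prod.snd

-- ===== PRECONDITION & SPEC =====
-- Pre_ excludes exactly the inputs where A raises ValueError: target given but every chunk strips to empty
def Pre_rebalance_chunks (chunks : List String) (target : Option Int) : Prop :=
  target = none ∨ ∃ s ∈ chunks, PySem.Str.strip s ≠ ""
instance (chunks : List String) (target : Option Int) : Decidable (Pre_rebalance_chunks chunks target) := by unfold Pre_rebalance_chunks; infer_instance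

def pvWitness_rebalance_chunks : List String × Option Int := (["hello world", "  ", "ab"], some 5)

def Spec_rebalance_chunks (chunks : List String) (target : Option Int) (out : List String) : Prop := out = rebalance_chunks_alt chunks target
instance (chunks : List String) (target : Option Int) (out : List String) : Decidable (Spec_rebalance_chunks chunks target out) := by unfold Spec_rebalance_chunks; infer_instance

-- ===== CLAIM (what is proved, stated in full; the proofs are below) =====
def Claim_equal_rebalance_chunks : Prop := ∀ (chunks : List String) (target : Option Int), Dom_rebalance_chunks chunks target → Pre_rebalance_chunks chunks target → Spec_rebalance_chunks chunks target (rebalance_chunks chunks target)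

-- ===== LEMMAS AND PROOFS =====

-- ---- lexicographic order on paths ----
theorem pvLexLt_irrefl (p : List Int) : pvLexLt p p = false := by
  induction p with
  | nil => rfl
  | cons a as ih => simp [pvLexLt, ih]

theorem pvLexLt_cons {a b : Int} {as bs : List Int} :
    pvLexLt (a :: as) (b :: bs) = true ↔ a < b ∨ (a = b ∧ pvLexLt as bs = true) := by
  simp only [pvLexLt]
  split_ifs with h1 h2
  · exact iff_of_true rfl (Or.inl h1)
  · exact iff_of_false (by simp) (by rintro (h | ⟨h, _⟩) <;> omega)
  · constructor
    · intro h; exact Or.inr ⟨by omega, h⟩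
    · rintro (h | ⟨_, h⟩)
      · exact absurd h h1
      · exact h

theorem pvLexLt_trans {p q r : List Int} (h1 : pvLexLt p q = true) (h2 : pvLexLt q r = true) :
    pvLexLt p r = true := by
  induction p generalizing q r with
  | nil =>
    cases q with
    | nil => simp [pvLexLt] at h1
    | cons b bs =>
      cases r with
      | nil => simp [pvLexLt] at h2
      | cons c cs => simp [pvLexLt]
  | cons a as ih =>
    cases q with
    | nil => simp [pvLexLt] at h1
    | cons b bs =>
      cases r with
      | nil => simp [pvLexLt] at h2
      | cons c cs =>
        rw [pvLexLt_cons] at h1 h2 ⊢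
        rcases h1 with h1 | ⟨h1, h1'⟩ <;> rcases h2 with h2 | ⟨h2, h2'⟩
        · left; omega
        · left; omega
        · left; omega
        · exact Or.inr ⟨by omega, ih h1' h2'⟩

theorem pvLexLt_asymm {p q : List Int} (h : pvLexLt p q = true) : pvLexLt q p = false := by
  by_contra hc
  have : pvLexLt q p = true := by revert hc; cases pvLexLt q p <;> simp
  have := pvLexLt_trans h this
  simp [pvLexLt_irrefl] at this

theorem pvLexLt_append_proper (p : List Int) (c : Int) (l : List Int) :
    pvLexLt p (p ++ c :: l) = true := by
  induction p with
  | nil => simp [pvLexLt]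
  | cons a as ih => simp [pvLexLt, ih]

theorem pvLexLt_append_left {p r : List Int} (l : List Int)
    (h1 : pvLexLt p r = true) (h2 : ¬ p <+: r) : pvLexLt (p ++ l) r = true := by
  induction p generalizing r with
  | nil => exact absurd (List.nil_prefix) h2
  | cons a as ih =>
    cases r with
    | nil => simp [pvLexLt] at h1
    | cons b bs =>
      rw [pvLexLt_cons] at h1
      rw [List.cons_append, pvLexLt_cons]
      rcases h1 with h1 | ⟨h1, h1'⟩
      · exact Or.inl h1
      · refine Or.inr ⟨h1, ih h1' ?_⟩
        intro hp
        exact h2 (List.cons_prefix_cons.mpr ⟨h1, hp⟩)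

theorem pvLexLt_append_same {l1 l2 : List Int} (p : List Int) (h : pvLexLt l1 l2 = true) :
    pvLexLt (p ++ l1) (p ++ l2) = true := by
  induction p with
  | nil => simpa
  | cons a as ih => simp [pvLexLt, ih]

theorem pvLexLt_iff_lt {p q : List Int} : pvLexLt p q = true ↔ p < q := by
  induction p generalizing q with
  | nil =>
    cases q with
    | nil => simp [pvLexLt]
    | cons b bs => simpa [pvLexLt] using List.nil_lt_cons b bs
  | cons a as ih =>
    cases q with
    | nil =>
      simp only [pvLexLt]
      constructor
      · intro h; exact absurd h (by simp)
      · intro h; exact absurd h (by simp [List.lt_iff_lex_lt, List.Lex])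
    | cons b bs => rw [pvLexLt_cons, List.cons_lt_cons_iff, ih]

-- the pairwise relation maintained on the list of paths
def pvPRel (p r : List Int) : Prop := pvLexLt p r = true ∧ ¬ p <+: r

theorem pvPRel_extend_right {a p : List Int} (c : Int) (h : pvPRel a p) : pvPRel a (p ++ [c]) := by
  obtain ⟨h1, h2⟩ := h
  constructor
  · exact pvLexLt_trans h1 (pvLexLt_append_proper p c [])
  · intro hp
    rcases List.prefix_concat_iff.mp hp with he | hp2
    · subst he
      have := pvLexLt_asymm h1
      rw [pvLexLt_append_proper] at this
      exact absurd this (by simp)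
    · exact h2 hp2

theorem pvPRel_extend_left {p r : List Int} (c : Int) (h : pvPRel p r) : pvPRel (p ++ [c]) r := by
  obtain ⟨h1, h2⟩ := h
  constructor
  · exact pvLexLt_append_left [c] h1 h2
  · intro hp
    exact h2 (List.IsPrefix.trans (List.prefix_append p [c]) hp)

theorem pvPRel_children (p : List Int) : pvPRel (p ++ [0]) (p ++ [1]) := by
  constructor
  · exact pvLexLt_append_same p (by decide)
  · intro hp
    have := (List.prefix_append_right_inj p).mp hp
    simp [List.cons_prefix_cons] at this

-- ---- key order ----
theorem pvKeyLt_iff {a b : Int × List Int} :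
    pvKeyLt a b = true ↔ a.1 < b.1 ∨ (a.1 = b.1 ∧ pvLexLt a.2 b.2 = true) := by
  unfold pvKeyLt
  split_ifs with h1 h2
  · exact iff_of_true rfl (Or.inl h1)
  · exact iff_of_false (by simp) (by rintro (h | ⟨h, _⟩) <;> omega)
  · constructor
    · intro h; exact Or.inr ⟨by omega, h⟩
    · rintro (h | ⟨_, h⟩)
      · exact absurd h h1
      · exact h

theorem pvKeyLt_trans {a b c : Int × List Int} (h1 : pvKeyLt a b = true) (h2 : pvKeyLt b c = true) :
    pvKeyLt a c = true := by
  rw [pvKeyLt_iff] at h1 h2 ⊢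
  rcases h1 with h1 | ⟨h1, h1'⟩ <;> rcases h2 with h2 | ⟨h2, h2'⟩
  · left; omega
  · left; omega
  · left; omega
  · right; exact ⟨by omega, pvLexLt_trans h1' h2'⟩

theorem pvKeyLt_asymm {a b : Int × List Int} (h : pvKeyLt a b = true) : pvKeyLt b a = false := by
  by_contra hc
  have hc : pvKeyLt b a = true := by revert hc; cases pvKeyLt b a <;> simp
  have := pvKeyLt_trans h hc
  rw [pvKeyLt_iff] at this
  rcases this with h' | ⟨_, h'⟩
  · omega
  · simp [pvLexLt_irrefl] at h'

-- ---- queue insertion ----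
theorem pvQInsert_perm (x : (Int × List Int) × String) (l : List ((Int × List Int) × String)) :
    (pvQInsert x l).Perm (x :: l) := by
  induction l with
  | nil => simp [pvQInsert]
  | cons y ys ih =>
    simp only [pvQInsert]
    split_ifs
    · exact List.Perm.refl _
    · exact List.Perm.trans (List.Perm.cons y ih) (List.Perm.swap x y ys)

def pvSortedQ (q : List ((Int × List Int) × String)) : Prop :=
  q.Pairwise (fun a b => pvKeyLt b.1 a.1 = false)

theorem pvQInsert_sorted {x : (Int × List Int) × String} {l : List ((Int × List Int) × String)}
    (h : pvSortedQ l) : pvSortedQ (pvQInsert x l) := by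
  induction l with
  | nil => simp [pvQInsert, pvSortedQ]
  | cons y ys ih =>
    rw [pvSortedQ, List.pairwise_cons] at h
    obtain ⟨hy, hys⟩ := h
    simp only [pvQInsert]
    split_ifs with hxy
    · rw [pvSortedQ, List.pairwise_cons]
      refine ⟨?_, List.pairwise_cons.mpr ⟨hy, hys⟩⟩
      intro z hz
      rcases List.mem_cons.mp hz with rfl | hz
      · exact pvKeyLt_asymm hxy
      · by_contra hc
        have hc : pvKeyLt z.1 x.1 = true := by revert hc; cases pvKeyLt z.1 x.1 <;> simp
        have := pvKeyLt_trans hc hxy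
        rw [hy z hz] at this
        exact absurd this (by simp)
    · rw [pvSortedQ, List.pairwise_cons]
      refine ⟨?_, ih hys⟩
      intro z hz
      have hz' := List.mem_cons.mp ((pvQInsert_perm x ys).mem_iff.mp hz)
      rcases hz' with rfl | hz'
      · simpa using hxy
      · exact hy z hz'

theorem pvFoldl_qInsert_perm (g : (Int × String) → (Int × List Int) × String) :
    ∀ (l : List (Int × String)) (acc : List ((Int × List Int) × String)),
    (l.foldl (fun q is => pvQInsert (g is) q) acc).Perm (l.map g ++ acc) := by
  intro l
  induction l with
  | nil => intro acc; simp
  | cons x xs ih =>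
    intro acc
    simp only [List.foldl_cons, List.map_cons]
    refine List.Perm.trans (ih _) ?_
    refine List.Perm.trans (List.Perm.append_left _ (pvQInsert_perm (g x) acc)) ?_
    exact List.perm_middle

theorem pvFoldl_qInsert_sorted (g : (Int × String) → (Int × List Int) × String) :
    ∀ (l : List (Int × String)) (acc : List ((Int × List Int) × String)),
    pvSortedQ acc → pvSortedQ (l.foldl (fun q is => pvQInsert (g is) q) acc) := by
  intro l
  induction l with
  | nil => intro acc h; simpa
  | cons x xs ih => intro acc h; exact ih _ (pvQInsert_sorted h)

-- ---- generic sorted-list head/uniqueness ----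
theorem pv_head_of_sorted_perm {α : Type} (lt : α → α → Bool) (q l1 l2 : List α) (x : α)
    (hperm : q.Perm (l1 ++ x :: l2)) (hsort : q.Pairwise (fun a b => lt b a = false))
    (hmin : ∀ y ∈ l1 ++ l2, lt x y = true) :
    ∃ t, q = x :: t ∧ t.Perm (l1 ++ l2) := by
  cases q with
  | nil => exact absurd (hperm.symm.eq_nil) (by simp)
  | cons h t =>
    by_cases hx : h = x
    · subst hx
      refine ⟨t, rfl, ?_⟩
      exact (hperm.trans List.perm_middle).cons_inv
    · exfalso
      have hhl : h ∈ l1 ++ x :: l2 := hperm.subset (by simp)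
      have hmem : h ∈ l1 ++ l2 := by
        simp only [List.mem_append, List.mem_cons] at hhl ⊢
        rcases hhl with h1 | h2 | h3
        · exact Or.inl h1
        · exact absurd h2 hx
        · exact Or.inr h3
      have hlt : lt x h = true := hmin h hmem
      have hxq : x ∈ h :: t := hperm.mem_iff.mpr (by simp)
      have hxt : x ∈ t := by
        rcases List.mem_cons.mp hxq with he | ht
        · exact absurd he.symm hx
        · exact ht
      rw [List.pairwise_cons] at hsort
      have := hsort.1 x hxt
      rw [hlt] at this
      exact absurd this (by simp)

-- ---- Python max(): first maximal element ----
theorem pvFoldlMax_split {α : Type} (f : α → Int) :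
    ∀ (xs : List α) (m : α),
    ∃ l1 b l2, m :: xs = l1 ++ b :: l2 ∧
      xs.foldl (fun acc x => match acc with
        | none => some x
        | some mm => if f mm < f x then some x else some mm) (some m) = some b ∧
      (∀ a ∈ l1, f a < f b) ∧ (∀ a ∈ l2, f a ≤ f b) := by
  intro xs
  induction xs with
  | nil => intro m; exact ⟨[], m, [], by simp, by simp, by simp, by simp⟩
  | cons x xs' ih =>
    intro m
    simp only [List.foldl_cons]
    by_cases hmx : f m < f x
    · obtain ⟨l1, b, l2, hsplit, hfold, hl1, hl2⟩ := ih x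
      refine ⟨m :: l1, b, l2, by rw [List.cons_append, ← hsplit], by simpa [hmx] using hfold, ?_, hl2⟩
      intro a ha
      rcases List.mem_cons.mp ha with rfl | ha'
      · -- f m < f b : b is x or occurs after x in l1's ordering
        cases l1 with
        | nil =>
          have hxb : x = b := by simpa using congrArg (fun l => l.head?) hsplit
          rw [← hxb]; exact hmx
        | cons c l1' =>
          have hcx : x = c := by simpa using congrArg (fun l => l.head?) hsplit
          have : f c < f b := hl1 c (by simp)
          rw [← hcx] at this; omega
      · exact hl1 a ha'
    · obtain ⟨l1, b, l2, hsplit, hfold, hl1, hl2⟩ := ih m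
      cases l1 with
      | nil =>
        have hbm : m = b := by simpa using congrArg (fun l => l.head?) hsplit
        have hbm := hbm.symm
        have hl2' : xs' = l2 := by simpa [hbm] using hsplit
        subst hbm
        refine ⟨[], b, x :: xs', by simp, by simpa [hmx] using hfold, by simp, ?_⟩
        intro a ha
        rcases List.mem_cons.mp ha with rfl | ha'
        · omega
        · exact hl2 a (hl2' ▸ ha')
      | cons c l1' =>
        have hcm : m = c := by simpa using congrArg (fun l => l.head?) hsplit
        have hcm := hcm.symm
        have htail : xs' = l1' ++ b :: l2 := by
          have := congrArg List.tail hsplit; simpa using this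
        refine ⟨m :: x :: l1', b, l2, by rw [List.cons_append, List.cons_append, ← htail],
          by simpa [hmx] using hfold, ?_, hl2⟩
        intro a ha
        have hmb : f m < f b := by have := hl1 c (by simp); rwa [hcm] at this
        rcases List.mem_cons.mp ha with rfl | ha'
        · exact hmb
        · rcases List.mem_cons.mp ha' with rfl | ha''
          · omega
          · exact hl1 a (by simp [ha''])

theorem pvMax?_split {α : Type} (f : α → Int) (xs : List α) (hx : xs ≠ []) :
    ∃ l1 b l2, xs = l1 ++ b :: l2 ∧ PySem.List.max? xs f = some b ∧
      (∀ a ∈ l1, f a < f b) ∧ (∀ a ∈ l2, f a ≤ f b) := by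
  cases xs with
  | nil => exact absurd rfl hx
  | cons x xs' =>
    obtain ⟨l1, b, l2, hsplit, hfold, hl1, hl2⟩ := pvFoldlMax_split f xs' x
    exact ⟨l1, b, l2, hsplit, by simpa [PySem.List.max?] using hfold, hl1, hl2⟩

-- index form over range(len(cs)) with key = len(cs[idx])
theorem pvMax?_argmax (cs : List String) (hcs : cs ≠ []) :
    ∃ jn : Nat, jn < cs.length ∧
      PySem.List.max? (PySem.List.pyRange 0 (PySem.List.len cs))
        (fun idx => PySem.Str.len (PySem.List.pyGetD cs idx "")) = some (jn : Int) ∧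
      (∀ k : Nat, k < jn → PySem.Str.len cs[k]! < PySem.Str.len cs[jn]!) ∧
      (∀ k : Nat, k < cs.length → PySem.Str.len cs[k]! ≤ PySem.Str.len cs[jn]!) := by
  have hlen : (PySem.List.pyRange 0 (PySem.List.len cs)).length = cs.length := by
    simp [PySem.List.length_pyRange_one, PySem.List.len_eq]
  have hne : PySem.List.pyRange 0 (PySem.List.len cs) ≠ [] := by
    intro h
    rw [h] at hlen
    exact hcs (List.length_eq_zero_iff.mp hlen.symm)
  obtain ⟨l1, b, l2, hsplit, hmax, hl1, hl2⟩ :=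
    pvMax?_split (fun idx => PySem.Str.len (PySem.List.pyGetD cs idx "")) _ hne
  have hlen2 : l1.length + 1 + l2.length = cs.length := by
    rw [← hlen, hsplit]; simp; omega
  have hjlt : l1.length < cs.length := by omega
  have hrange : ∀ (k : Nat), k < cs.length →
      (PySem.List.pyRange 0 (PySem.List.len cs))[k]? = some (k : Int) := by
    intro k h
    rw [List.getElem?_eq_getElem (by rw [hlen]; omega)]
    rw [PySem.List.getElem_pyRange_one 0 (PySem.List.len cs) k (by rw [hlen]; omega)]
    simp
  have hb : b = (l1.length : Int) := by
    have h1 : (l1 ++ b :: l2)[l1.length]? = some b := by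
      rw [List.getElem?_append_right (le_refl l1.length)]
      simp
    have h2 := hrange l1.length hjlt
    rw [hsplit, h1] at h2
    exact Option.some.inj h2
  have hf : ∀ (k : Nat), k < cs.length →
      PySem.Str.len (PySem.List.pyGetD cs (k : Int) "") = PySem.Str.len cs[k]! := by
    intro k h
    rw [PySem.List.pyGetD_eq_getElem cs "" (by positivity) (by exact_mod_cast h)]
    rw [getElem!_pos cs k h]
    simp
  have hmemleft : ∀ (k : Nat), k < l1.length → (k : Int) ∈ l1 := by
    intro k hk
    have h1 : (l1 ++ b :: l2)[k]? = l1[k]? := List.getElem?_append_left (by omega)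
    have h2 := hrange k (by omega)
    rw [hsplit, h1] at h2
    exact List.mem_of_getElem? h2
  refine ⟨l1.length, hjlt, by rw [hmax, hb], ?_, ?_⟩
  · intro k hk
    have hkcs : k < cs.length := by omega
    have := hl1 _ (hmemleft k hk)
    rw [hf k hkcs, hb, hf l1.length hjlt] at this
    exact this
  · intro k hk
    rcases Nat.lt_trichotomy k l1.length with h | h | h
    · have := hl1 _ (hmemleft k h)
      rw [hf k (by omega), hb, hf l1.length hjlt] at this
      omega
    · subst h; exact le_refl _
    · have hmem : (k : Int) ∈ l2 := by
        have h1 : (l1 ++ b :: l2)[k]? = (b :: l2)[k - l1.length]? :=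
          List.getElem?_append_right (by omega)
        have h3 := hrange k hk
        rw [hsplit, h1] at h3
        have hmem' : (k : Int) ∈ b :: l2 := List.mem_of_getElem? h3
        rcases List.mem_cons.mp hmem' with he | hm
        · exfalso
          rw [hb] at he
          have : k = l1.length := by exact_mod_cast he
          omega
        · exact hm
      have := hl2 _ hmem
      rw [hf k hk, hb, hf l1.length hjlt] at this
      exact this

-- ---- the simulation relation ----
def pvDec (ps : List (List Int)) (cs : List String) : List ((Int × List Int) × String) :=
  (ps.zip cs).map (fun pc => ((-(PySem.Str.len pc.2), pc.1), pc.2))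

def pvRel (cs : List String) (q : List ((Int × List Int) × String)) : Prop :=
  ∃ ps : List (List Int), ps.length = cs.length ∧ ps.Pairwise pvPRel ∧
    q.Perm (pvDec ps cs) ∧ pvSortedQ q

theorem pvDec_append {ps1 ps2 : List (List Int)} {cs1 cs2 : List String}
    (h : ps1.length = cs1.length) :
    pvDec (ps1 ++ ps2) (cs1 ++ cs2) = pvDec ps1 cs1 ++ pvDec ps2 cs2 := by
  simp [pvDec, List.zip_append h]

theorem pvDec_cons {p : List Int} {s : String} {ps : List (List Int)} {cs : List String} :
    pvDec (p :: ps) (s :: cs) = ((-(PySem.Str.len s), p), s) :: pvDec ps cs := rfl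

theorem pv_pairwise_update {ps1 ps2 : List (List Int)} {p : List Int}
    (h : (ps1 ++ p :: ps2).Pairwise pvPRel) :
    (ps1 ++ (p ++ [0]) :: (p ++ [1]) :: ps2).Pairwise pvPRel := by
  rw [List.pairwise_append] at h ⊢
  obtain ⟨h1, h2, h12⟩ := h
  rw [List.pairwise_cons] at h2
  obtain ⟨hp2, h2'⟩ := h2
  refine ⟨h1, ?_, ?_⟩
  · rw [List.pairwise_cons]
    constructor
    · intro b hb
      rcases List.mem_cons.mp hb with rfl | hb'
      · exact pvPRel_children p
      · exact pvPRel_extend_left 0 (hp2 b hb')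
    · rw [List.pairwise_cons]
      exact ⟨fun b hb => pvPRel_extend_left 1 (hp2 b hb), h2'⟩
  · intro a ha b hb
    rcases List.mem_cons.mp hb with rfl | hb'
    · exact pvPRel_extend_right 0 (h12 a ha p (by simp))
    · rcases List.mem_cons.mp hb' with rfl | hb''
      · exact pvPRel_extend_right 1 (h12 a ha p (by simp))
      · exact h12 a ha b (by simp [hb''])

theorem pv_dominates {cs1 cs2 : List String} {src : String}
    {ps1 ps2 : List (List Int)} {p : List Int}
    (hstrict : ∀ s ∈ cs1, PySem.Str.len s < PySem.Str.len src)
    (hweak : ∀ s ∈ cs2, PySem.Str.len s ≤ PySem.Str.len src)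
    (hpw : (ps1 ++ p :: ps2).Pairwise pvPRel) :
    ∀ y ∈ pvDec ps1 cs1 ++ pvDec ps2 cs2,
      pvKeyLt (-(PySem.Str.len src), p) y.1 = true := by
  intro y hy
  rcases List.mem_append.mp hy with hy | hy
  · rcases List.mem_map.mp hy with ⟨pc, hpc, rfl⟩
    have hmem := List.of_mem_zip hpc
    rw [pvKeyLt_iff]
    left
    have := hstrict pc.2 hmem.2
    simpa using this
  · rcases List.mem_map.mp hy with ⟨pc, hpc, rfl⟩
    have hmem := List.of_mem_zip hpc
    have hle := hweak pc.2 hmem.2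
    rw [pvKeyLt_iff]
    rcases lt_or_eq_of_le hle with hlt | heq
    · left; simpa using hlt
    · right
      constructor
      · simpa using heq.symm
      · rw [List.pairwise_append] at hpw
        have := (List.pairwise_cons.mp hpw.2.1).1 pc.1 hmem.1
        exact this.1

theorem pv_perm_update {rest D1 D2 : List ((Int × List Int) × String)}
    {Lft R : (Int × List Int) × String} (hrest : rest.Perm (D1 ++ D2)) :
    (pvQInsert R (pvQInsert Lft rest)).Perm (D1 ++ Lft :: R :: D2) := by
  have c1 : (pvQInsert R (pvQInsert Lft rest)).Perm (R :: Lft :: rest) :=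
    (pvQInsert_perm R _).trans (List.Perm.cons R (pvQInsert_perm Lft rest))
  have c2 : (R :: Lft :: rest).Perm (Lft :: R :: (D1 ++ D2)) :=
    ((List.Perm.cons R (List.Perm.cons Lft hrest))).trans (List.Perm.swap Lft R _)
  have c3 : (D1 ++ Lft :: R :: D2).Perm (Lft :: R :: (D1 ++ D2)) := by
    refine List.perm_middle.trans (List.Perm.cons Lft ?_)
    exact List.perm_middle
  exact (c1.trans c2).trans c3.symm

theorem pv_mem_take_lt {cs : List String} {jn : Nat} (hjn : jn < cs.length)
    (hstrictI : ∀ k : Nat, k < jn → PySem.Str.len cs[k]! < PySem.Str.len cs[jn]!) :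
    ∀ s ∈ cs.take jn, PySem.Str.len s < PySem.Str.len cs[jn]! := by
  intro s hs
  rw [List.mem_take_iff_getElem] at hs
  obtain ⟨i, hi, rfl⟩ := hs
  have hik : i < jn := by omega
  have := hstrictI i hik
  rwa [getElem!_pos cs i (by omega)] at this

theorem pv_mem_drop_le {cs : List String} {jn : Nat} (hjn : jn < cs.length)
    (hweakI : ∀ k : Nat, k < cs.length → PySem.Str.len cs[k]! ≤ PySem.Str.len cs[jn]!) :
    ∀ s ∈ cs.drop (jn + 1), PySem.Str.len s ≤ PySem.Str.len cs[jn]! := by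
  intro s hs
  rw [List.mem_iff_getElem] at hs
  obtain ⟨i, hi, rfl⟩ := hs
  rw [List.getElem_drop]
  have hlt : jn + 1 + i < cs.length := by
    have := hi; simp [List.length_drop] at this; omega
  have := hweakI (jn + 1 + i) hlt
  rwa [getElem!_pos cs _ (by omega)] at this

theorem pv_lockstep (wanted : Int) :
    ∀ (fuel : Nat) (cs : List String) (q : List ((Int × List Int) × String)),
    cs ≠ [] → ((cs.length : Int) ≤ wanted) → pvRel cs q →
    rebalance_chunks_loopA wanted fuel cs ≠ [] ∧
    ((rebalance_chunks_loopA wanted fuel cs).length : Int) ≤ wanted ∧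
    pvRel (rebalance_chunks_loopA wanted fuel cs) (rebalance_chunks_loopB wanted fuel q) := by
  intro fuel
  induction fuel with
  | zero =>
    intro cs q hne hle hrel
    exact ⟨hne, hle, hrel⟩
  | succ fuel ih =>
    intro cs q hne hle hrel
    obtain ⟨ps, hpslen, hpw, hperm, hsort⟩ := hrel
    have hqlen : q.length = cs.length := by
      rw [hperm.length_eq]
      simp [pvDec, hpslen]
    by_cases hcond : PySem.List.len cs < wanted
    · -- loop body runs
      obtain ⟨jn, hjn, hmax, hstrictI, hweakI⟩ := pvMax?_argmax cs hne
      -- split cs and ps at position jn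
      have hjn' : jn < ps.length := by omega
      have hcs_split : cs = cs.take jn ++ cs[jn]! :: cs.drop (jn + 1) := by
        rw [getElem!_pos cs jn hjn, List.getElem_cons_drop, List.take_append_drop]
      have hps_split : ps = ps.take jn ++ ps[jn]! :: ps.drop (jn + 1) := by
        rw [getElem!_pos ps jn hjn', List.getElem_cons_drop, List.take_append_drop]
      have htklen : (ps.take jn).length = (cs.take jn).length := by
        simp [List.length_take]; omega
      have hD : pvDec ps cs =
          pvDec (ps.take jn) (cs.take jn) ++
            ((-(PySem.Str.len cs[jn]!), ps[jn]!), cs[jn]!) ::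
              pvDec (ps.drop (jn + 1)) (cs.drop (jn + 1)) := by
        conv_lhs => rw [hps_split, hcs_split]
        rw [pvDec_append htklen, pvDec_cons]
      have hpw' : ((ps.take jn) ++ ps[jn]! :: ps.drop (jn + 1)).Pairwise pvPRel := by
        rw [← hps_split]; exact hpw
      have hdom := pv_dominates (pv_mem_take_lt hjn hstrictI) (pv_mem_drop_le hjn hweakI) hpw'
      obtain ⟨rest, hq, hrestperm⟩ :=
        pv_head_of_sorted_perm (fun a b => pvKeyLt a.1 b.1) q
          (pvDec (ps.take jn) (cs.take jn)) (pvDec (ps.drop (jn + 1)) (cs.drop (jn + 1)))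
          ((-(PySem.Str.len cs[jn]!), ps[jn]!), cs[jn]!)
          (hperm.trans (by rw [hD])) hsort hdom
      subst hq
      -- A's source value
      have hsrc : PySem.List.pyGetD cs (jn : Int) "" = cs[jn]! := by
        rw [PySem.List.pyGetD_eq_getElem cs "" (by positivity) (by exact_mod_cast hjn)]
        rw [getElem!_pos cs jn hjn]
        simp
      -- unfold one step of both loops
      rw [show rebalance_chunks_loopA wanted (fuel + 1) cs =
        (if PySem.List.len cs < wanted then
          match PySem.List.max? (PySem.List.pyRange 0 (PySem.List.len cs))
              (fun idx => PySem.Str.len (PySem.List.pyGetD cs idx "")) with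
          | none => cs
          | some longest_idx =>
            let source := PySem.List.pyGetD cs longest_idx ""
            if PySem.Str.len source < 2 then cs
            else
              let split_at := max 1 (PySem.Int.floordiv (PySem.Str.len source) 2)
              let left := PySem.Str.strip (PySem.Str.slice source none (some split_at))
              let right := PySem.Str.strip (PySem.Str.slice source (some split_at) none)
              if left = "" ∨ right = "" then cs
              else rebalance_chunks_loopA wanted fuel
                (PySem.List.slice cs none (some longest_idx) ++ [left, right] ++
                 PySem.List.slice cs (some (longest_idx + 1)) none)
        else cs) from rfl]
      rw [if_pos hcond, hmax]
      simp only [hsrc]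
      rw [show rebalance_chunks_loopB wanted (fuel + 1)
            (((-(PySem.Str.len cs[jn]!), ps[jn]!), cs[jn]!) :: rest) =
        (if PySem.List.len ((((-(PySem.Str.len cs[jn]!), ps[jn]!), cs[jn]!)) :: rest) < wanted then
          if PySem.Str.len cs[jn]! < 2 then (((-(PySem.Str.len cs[jn]!), ps[jn]!), cs[jn]!)) :: rest
          else
            let left := PySem.Str.strip (PySem.Str.slice cs[jn]! none
              (some (PySem.Int.floordiv (PySem.Str.len cs[jn]!) 2)))
            let right := PySem.Str.strip (PySem.Str.slice cs[jn]!
              (some (PySem.Int.floordiv (PySem.Str.len cs[jn]!) 2)) none)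
            if left = "" ∨ right = "" then (((-(PySem.Str.len cs[jn]!), ps[jn]!), cs[jn]!)) :: rest
            else rebalance_chunks_loopB wanted fuel
              (pvQInsert ((-(PySem.Str.len right), ps[jn]! ++ [1]), right)
                (pvQInsert ((-(PySem.Str.len left), ps[jn]! ++ [0]), left) rest))
        else (((-(PySem.Str.len cs[jn]!), ps[jn]!), cs[jn]!)) :: rest) from rfl]
      have hcondB : PySem.List.len ((((-(PySem.Str.len cs[jn]!), ps[jn]!), cs[jn]!)) :: rest) < wanted := by
        rw [PySem.List.len_eq] at hcond ⊢
        have : (((-(PySem.Str.len cs[jn]!), ps[jn]!), cs[jn]!) :: rest).length = cs.length := hqlen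
        rw [this]
        exact hcond
      rw [if_pos hcondB]
      by_cases hsmall : PySem.Str.len cs[jn]! < 2
      · rw [if_pos hsmall, if_pos hsmall]
        exact ⟨hne, hle, ps, hpslen, hpw, hperm, hsort⟩
      · rw [if_neg hsmall, if_neg hsmall]
        have hsplitat : max 1 (PySem.Int.floordiv (PySem.Str.len cs[jn]!) 2) =
            PySem.Int.floordiv (PySem.Str.len cs[jn]!) 2 := by
          rw [PySem.Int.floordiv_eq_ediv_of_pos (by norm_num)]
          omega
        simp only [hsplitat]
        by_cases hempty : PySem.Str.strip (PySem.Str.slice cs[jn]! none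
              (some (PySem.Int.floordiv (PySem.Str.len cs[jn]!) 2))) = "" ∨
            PySem.Str.strip (PySem.Str.slice cs[jn]!
              (some (PySem.Int.floordiv (PySem.Str.len cs[jn]!) 2)) none) = ""
        · rw [if_pos hempty, if_pos hempty]
          exact ⟨hne, hle, ps, hpslen, hpw, hperm, hsort⟩
        · rw [if_neg hempty, if_neg hempty]
          -- the recursive step
          set left := PySem.Str.strip (PySem.Str.slice cs[jn]! none
            (some (PySem.Int.floordiv (PySem.Str.len cs[jn]!) 2))) with hleft
          set right := PySem.Str.strip (PySem.Str.slice cs[jn]!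
            (some (PySem.Int.floordiv (PySem.Str.len cs[jn]!) 2)) none) with hright
          have hsliceL : PySem.List.slice cs none (some ((jn : Nat) : Int)) = cs.take jn := by
            rw [PySem.List.slice_to cs (by positivity)]
            simp
          have hsliceR : PySem.List.slice cs (some (((jn : Nat) : Int) + 1)) none = cs.drop (jn + 1) := by
            rw [show ((jn : Nat) : Int) + 1 = (((jn + 1 : Nat)) : Int) by push_cast; ring]
            rw [PySem.List.slice_from cs (by positivity)]
            simp
          rw [hsliceL, hsliceR]
          apply ih
          · simp
          · have hlen' : (cs.take jn ++ [left, right] ++ cs.drop (jn + 1)).length = cs.length + 1 := by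
              simp [List.length_take, List.length_drop]
              omega
            rw [hlen']
            rw [PySem.List.len_eq] at hcond
            push_cast
            omega
          · refine ⟨ps.take jn ++ (ps[jn]! ++ [0]) :: (ps[jn]! ++ [1]) :: ps.drop (jn + 1),
              ?_, pv_pairwise_update hpw', ?_, ?_⟩
            · simp [List.length_take, List.length_drop]
              omega
            · have hDec2 : pvDec (ps.take jn ++ (ps[jn]! ++ [0]) :: (ps[jn]! ++ [1]) :: ps.drop (jn + 1))
                  (cs.take jn ++ [left, right] ++ cs.drop (jn + 1)) =
                  pvDec (ps.take jn) (cs.take jn) ++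
                    ((-(PySem.Str.len left), ps[jn]! ++ [0]), left) ::
                    ((-(PySem.Str.len right), ps[jn]! ++ [1]), right) ::
                    pvDec (ps.drop (jn + 1)) (cs.drop (jn + 1)) := by
                rw [List.append_assoc]
                rw [pvDec_append htklen]
                rfl
              rw [hDec2]
              exact pv_perm_update hrestperm
            · exact pvQInsert_sorted (pvQInsert_sorted (List.Pairwise.of_cons hsort))
    · -- loop exits
      rw [show rebalance_chunks_loopA wanted (fuel + 1) cs =
        (if PySem.List.len cs < wanted then
          match PySem.List.max? (PySem.List.pyRange 0 (PySem.List.len cs))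
              (fun idx => PySem.Str.len (PySem.List.pyGetD cs idx "")) with
          | none => cs
          | some longest_idx =>
            let source := PySem.List.pyGetD cs longest_idx ""
            if PySem.Str.len source < 2 then cs
            else
              let split_at := max 1 (PySem.Int.floordiv (PySem.Str.len source) 2)
              let left := PySem.Str.strip (PySem.Str.slice source none (some split_at))
              let right := PySem.Str.strip (PySem.Str.slice source (some split_at) none)
              if left = "" ∨ right = "" then cs
              else rebalance_chunks_loopA wanted fuel
                (PySem.List.slice cs none (some longest_idx) ++ [left, right] ++
                 PySem.List.slice cs (some (longest_idx + 1)) none)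
        else cs) from rfl]
      rw [if_neg hcond]
      cases q with
      | nil =>
        exfalso
        have : cs.length = 0 := by simpa using hqlen.symm
        exact hne (List.length_eq_zero_iff.mp this)
      | cons x restq =>
        obtain ⟨⟨k, path⟩, source⟩ := x
        rw [show rebalance_chunks_loopB wanted (fuel + 1) (((k, path), source) :: restq) =
          (if PySem.List.len (((k, path), source) :: restq) < wanted then
            if PySem.Str.len source < 2 then ((k, path), source) :: restq
            else
              let left := PySem.Str.strip (PySem.Str.slice source none
                (some (PySem.Int.floordiv (PySem.Str.len source) 2)))
              let right := PySem.Str.strip (PySem.Str.slice source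
                (some (PySem.Int.floordiv (PySem.Str.len source) 2)) none)
              if left = "" ∨ right = "" then ((k, path), source) :: restq
              else rebalance_chunks_loopB wanted fuel
                (pvQInsert ((-(PySem.Str.len right), path ++ [1]), right)
                  (pvQInsert ((-(PySem.Str.len left), path ++ [0]), left) restq))
          else ((k, path), source) :: restq) from rfl]
        have hcondB : ¬ PySem.List.len (((k, path), source) :: restq) < wanted := by
          rw [PySem.List.len_eq] at hcond ⊢
          have : (((k, path), source) :: restq).length = cs.length := hqlen
          rw [this]
          exact hcond
        rw [if_neg hcondB]
        exact ⟨hne, hle, ps, hpslen, hpw, hperm, hsort⟩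

theorem pv_length_enumerate {α : Type} (xs : List α) (s : Int) :
    (PySem.List.enumerate xs s).length = xs.length := by
  induction xs generalizing s with
  | nil => rfl
  | cons x xs ih => simp [PySem.List.enumerate, ih]

theorem pv_dec_enum (xs : List String) (s : Int) :
    pvDec ((PySem.List.enumerate xs s).map (fun is => [is.1])) xs =
      (PySem.List.enumerate xs s).map (fun is => ((-(PySem.Str.len is.2), [is.1]), is.2)) := by
  induction xs generalizing s with
  | nil => rfl
  | cons x xs ih =>
    simp only [PySem.List.enumerate, List.map_cons]
    rw [show pvDec ([(s : Int)] :: (PySem.List.enumerate xs (s + 1)).map (fun is => [is.1])) (x :: xs)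
      = ((-(PySem.Str.len x), [(s : Int)]), x) ::
        pvDec ((PySem.List.enumerate xs (s + 1)).map (fun is => [is.1])) xs from rfl]
    rw [ih]

theorem pv_zip_pairwise {α β : Type} {R : α → α → Prop} :
    ∀ {ps : List α} {cs : List β}, ps.Pairwise R →
    (ps.zip cs).Pairwise (fun a b => R a.1 b.1) := by
  intro ps
  induction ps with
  | nil => intro cs _; simp
  | cons p ps ih =>
    intro cs h
    cases cs with
    | nil => simp
    | cons s cs =>
      rw [List.pairwise_cons] at h
      rw [List.zip_cons_cons, List.pairwise_cons]
      refine ⟨?_, ih h.2⟩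
      intro y hy
      exact h.1 y.1 (List.of_mem_zip hy).1

theorem pv_dec_pairwise {ps : List (List Int)} {cs : List String} (h : ps.Pairwise pvPRel) :
    (pvDec ps cs).Pairwise (fun a b => (fun kv => kv.1.2) a < (fun kv => kv.1.2) b) := by
  rw [pvDec, List.pairwise_map]
  refine List.Pairwise.imp ?_ (pv_zip_pairwise h)
  intro a b hab
  exact pvLexLt_iff_lt.mp hab.1

theorem pv_map_snd_dec {ps : List (List Int)} {cs : List String} (h : ps.length = cs.length) :
    (pvDec ps cs).map Prod.snd = cs := by
  simp only [pvDec, List.map_map]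
  exact List.map_snd_zip (by omega)

theorem pv_main (chunks : List String) (t : Int)
    (hpre : Pre_rebalance_chunks chunks (some t)) :
    rebalance_chunks chunks (some t) = rebalance_chunks_alt chunks (some t) := by
  have hclean_ne : pvClean chunks ≠ [] := by
    rcases hpre with h | ⟨s, hs, hne⟩
    · exact absurd h (by simp)
    · intro hnil
      have hmem : PySem.Str.strip s ∈ pvClean chunks := by
        simp only [pvClean, List.mem_filterMap]
        exact ⟨s, hs, by simp [hne]⟩
      rw [hnil] at hmem
      exact absurd hmem (by simp)
  have hA : rebalance_chunks chunks (some t) =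
      (if PySem.List.len (pvClean chunks) = max 1 t then pvClean chunks
       else if PySem.List.len (pvClean chunks) > max 1 t then
         PySem.List.slice (pvClean chunks) none (some (max 1 t))
       else PySem.List.slice
         (rebalance_chunks_loopA (max 1 t)
           (max 1 t - PySem.List.len (pvClean chunks)).toNat (pvClean chunks))
         none (some (max 1 t))) := rfl
  have hB : rebalance_chunks_alt chunks (some t) =
      (if max 1 t ≤ PySem.List.len (pvClean chunks) then
         PySem.List.slice (pvClean chunks) none (some (max 1 t))
       else (PySem.List.sorted
         (rebalance_chunks_loopB (max 1 t)
           (max 1 t - PySem.List.len (pvClean chunks)).toNat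
           ((PySem.List.enumerate (pvClean chunks) 0).foldl
             (fun q is => pvQInsert ((-(PySem.Str.len is.2), [is.1]), is.2) q) []))
         (fun kv => kv.1.2)).map Prod.snd) := rfl
  rw [hA, hB]
  set wanted := max 1 t with hw
  set clean := pvClean chunks with hc
  rw [PySem.List.len_eq]
  have hw1 : 1 ≤ wanted := le_max_left 1 t
  by_cases h1 : (clean.length : Int) = wanted
  · rw [if_pos h1, if_pos (le_of_eq h1.symm)]
    rw [PySem.List.slice_to clean (by omega)]
    rw [List.take_of_length_le (by omega)]
  · rw [if_neg h1]
    by_cases h2 : (clean.length : Int) > wanted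
    · rw [if_pos h2, if_pos (by omega)]
    · rw [if_neg h2, if_neg (by omega)]
      have hlt : (clean.length : Int) < wanted := by omega
      have hrel : pvRel clean ((PySem.List.enumerate clean 0).foldl
          (fun q is => pvQInsert ((-(PySem.Str.len is.2), [is.1]), is.2) q) []) := by
        refine ⟨(PySem.List.enumerate clean 0).map (fun is => [is.1]), ?_, ?_, ?_, ?_⟩
        · simp [pv_length_enumerate]
        · rw [List.pairwise_map]
          refine List.Pairwise.imp ?_ (PySem.List.pairwise_lt_enumerate clean 0)
          intro a b hab
          constructor
          · exact pvLexLt_cons.mpr (Or.inl hab)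
          · intro hp
            rcases List.cons_prefix_cons.mp hp with ⟨he, _⟩
            omega
        · refine ((pvFoldl_qInsert_perm
            (fun is => ((-(PySem.Str.len is.2), [is.1]), is.2))
            (PySem.List.enumerate clean 0) []).trans ?_)
          rw [List.append_nil, pv_dec_enum]
        · exact pvFoldl_qInsert_sorted _ (PySem.List.enumerate clean 0) [] (by simp [pvSortedQ])
      obtain ⟨hneF, hleF, psF, hlenF, hpwF, hpermF, hsortF⟩ :=
        pv_lockstep wanted ((wanted - (clean.length : Int)).toNat) clean _
          hclean_ne (le_of_lt hlt) hrel
      rw [PySem.List.slice_to _ (by omega)]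
      rw [List.take_of_length_le (by omega)]
      have hfin := PySem.List.sorted_eq_of_perm_of_pairwise_lt _ _ (fun kv => kv.1.2)
        hpermF.symm (pv_dec_pairwise hpwF)
      have hfin2 : PySem.List.sorted
          (rebalance_chunks_loopB wanted (wanted - (clean.length : Int)).toNat
            ((PySem.List.enumerate clean 0).foldl
              (fun q is => pvQInsert ((-(PySem.Str.len is.2), [is.1]), is.2) q) []))
          (fun kv => kv.1.2) =
          pvDec psF (rebalance_chunks_loopA wanted (wanted - (clean.length : Int)).toNat clean) := by
        convert hfin using 2
      rw [hfin2]
      exact (pv_map_snd_dec hlenF).symm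

-- ===== VERDICT (by name: the statement is the Claim_ definition above) =====
theorem rebalance_chunks_spec : Claim_equal_rebalance_chunks := by
  intro chunks target hdom hpre
  unfold Spec_rebalance_chunks
  cases target with
  | none => rfl
  | some t => exact pv_main chunks t hpre
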